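-- pv_equiv track=rewrite | github.com/evchibisova/contests | Substrings graph/task_strings_graph.py | make_pairs_list
-- ===== SOURCE A (Python) =====
-- def make_pairs_list(string_list):
--     """input: list of strings;
--     output: dict of {word1word2: arc}, number of tops"""
--     d = dict()
--     tops_set = set()
--     for s in string_list:
--         for i in range(len(s) - 3):
--             tops_set.update({s[i:i+3], s[i+1:i+4]})
--             pair = s[i:i+3] + s[i+1:i+4]
--             if pair not in d:
--                 d[pair] = 1
--             else:
--                 d[pair] += 1
--     return d, len(tops_set)
-- ===== SOURCE B (Python) =====
-- def make_pairs_list(string_list):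
--     """input: list of strings;
--     output: dict of {word1word2: arc}, number of tops"""
--     d = {}
--     tops = set()
--     for s in string_list:
--         w = ""
--         for ch in s:
--             w = (w + ch)[-4:]
--             if len(w) == 4:
--                 a = w[:3]
--                 b = w[1:]
--                 tops.add(a)
--                 tops.add(b)
--                 key = a + b
--                 d[key] = d.get(key, 0) + 1
--     return d, len(tops)
-- ===== Notes on version B (the rewrite author's own statement) =====
-- stated objective: alternative
-- what changed: A slices each string four times per index of range(len(s)-3); B makes a single pass over the characters of each string carrying a 4-character sliding window, emitting the trigram pair from each full window.
import Mathlib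
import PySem

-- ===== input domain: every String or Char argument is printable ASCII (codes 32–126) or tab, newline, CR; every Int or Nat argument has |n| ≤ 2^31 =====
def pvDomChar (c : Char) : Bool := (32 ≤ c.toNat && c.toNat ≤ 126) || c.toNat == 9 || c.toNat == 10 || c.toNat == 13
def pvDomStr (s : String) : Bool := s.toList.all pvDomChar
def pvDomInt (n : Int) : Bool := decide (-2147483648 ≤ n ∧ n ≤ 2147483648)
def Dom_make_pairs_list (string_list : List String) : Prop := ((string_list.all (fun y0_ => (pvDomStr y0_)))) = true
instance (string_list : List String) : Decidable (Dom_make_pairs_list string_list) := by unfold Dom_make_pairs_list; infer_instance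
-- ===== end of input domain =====

-- B replaces A's slice-by-index inner loop over range(len(s)-3) by a single character pass
-- per string with a 4-character sliding window (objective: alternative decomposition, same cost).

-- ===== PORT A =====
-- loop state shared by both ports: (the dict d, the set tops_set)
abbrev pvSt := PySem.Dict String Int × PySem.Set String

-- body of A's inner 'for i in range(len(s) - 3)' loop, on s's characters cs
-- (Python string slicing / concatenation ported exactly on the code-point lists)
def pvStepA (cs : List Char) (st : pvSt) (i : Int) : pvSt :=
  let t1 := String.ofList (PySem.List.slice cs (some i) (some (i + 3)))      -- s[i:i+3]
  let t2 := String.ofList (PySem.List.slice cs (some (i + 1)) (some (i + 4)))  -- s[i+1:i+4]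
  let tops := PySem.Set.add (PySem.Set.add st.2 t1) t2   -- tops_set.update({t1, t2})
  let pair := String.ofList (t1.toList ++ t2.toList)     -- t1 + t2
  let d := if st.1.contains pair = false then st.1.insert pair 1
           else st.1.modify pair 0 (· + 1)
  (d, tops)

def make_pairs_list (string_list : List String) : (List (String × Int)) × Int :=
  let st := string_list.foldl
    (fun st s =>
      (PySem.List.pyRange 0 (PySem.Str.len s - 3) 1).foldl (pvStepA s.toList) st)
    (PySem.Dict.empty, PySem.Set.empty)
  (st.1.items, PySem.Set.len st.2)

-- ===== PORT B =====
-- body of B's 'for ch in s' loop: state ((d, tops), window w)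
def pvStepB (q : pvSt × List Char) (ch : Char) : pvSt × List Char :=
  let w := PySem.List.slice (q.2 ++ [ch]) (some (-4)) none   -- (w + ch)[-4:]
  if w.length == 4 then
    let a := String.ofList (PySem.List.slice w none (some 3))   -- w[:3]
    let b := String.ofList (PySem.List.slice w (some 1) none)   -- w[1:]
    let tops := PySem.Set.add (PySem.Set.add q.1.2 a) b
    let key := String.ofList (a.toList ++ b.toList)             -- a + b
    ((q.1.1.insert key (q.1.1.getD key 0 + 1), tops), w)
  else (q.1, w)

def make_pairs_list_alt (string_list : List String) : (List (String × Int)) × Int :=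
  let st := string_list.foldl
    (fun st s => (s.toList.foldl pvStepB (st, ([] : List Char))).1)
    (PySem.Dict.empty, PySem.Set.empty)
  (st.1.items, PySem.Set.len st.2)

-- ===== PRECONDITION & SPEC =====
def Spec_make_pairs_list (string_list : List String) (out : (List (String × Int)) × Int) : Prop := out = make_pairs_list_alt string_list
instance (string_list : List String) (out : (List (String × Int)) × Int) : Decidable (Spec_make_pairs_list string_list out) := by unfold Spec_make_pairs_list; infer_instance

-- ===== CLAIM (what is proved, stated in full; the proofs are below) =====
def Claim_equal_make_pairs_list : Prop := ∀ (string_list : List String), Dom_make_pairs_list string_list → Spec_make_pairs_list string_list (make_pairs_list string_list)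

-- ===== LEMMAS AND PROOFS =====

-- A's two dict-update branches are B's single counting insert
lemma pv_dict_update (d : PySem.Dict String Int) (k : String) :
    (if d.contains k = false then d.insert k 1 else d.modify k 0 (· + 1))
      = d.insert k (d.getD k 0 + 1) := by
  by_cases h : d.contains k = false
  · rw [if_pos h, PySem.Dict.getD_of_not_contains (h := h)]
    norm_num
  · simp [h]; rfl

-- B's window after one more character is the last ≤ 4 characters of the longer prefix
lemma pv_window_step (cs : List Char) (c : Char) :
    PySem.List.slice (cs.drop (cs.length - 4) ++ [c]) (some (-4)) none
      = (cs ++ [c]).drop (cs.length + 1 - 4) := by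
  rw [PySem.List.slice_from_neg_ofNat _ 4 (by norm_num)]
  rcases Nat.lt_or_ge 3 cs.length with hn | hn
  case inr =>
    have e1 : cs.length - 4 = 0 := by omega
    have e2 : cs.length + 1 - 4 = 0 := by omega
    simp [e1, e2]
  case inl =>
    have h1 : (cs.drop (cs.length - 4) ++ [c]).length - 4 = 1 := by simp; omega
    rw [h1, List.drop_append_of_le_length (by simp; omega), List.drop_drop,
        List.drop_append_of_le_length (by omega : cs.length + 1 - 4 ≤ cs.length)]
    congr 2
    omega

-- a slice lying entirely inside cs ignores an appended character
lemma pv_slice_append (cs : List Char) (c : Char) (a b : Int)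
    (h0 : 0 ≤ a) (hb : 0 ≤ b) (ha : a ≤ (cs.length : Int)) (h : b ≤ (cs.length : Int)) :
    PySem.List.slice (cs ++ [c]) (some a) (some b) = PySem.List.slice cs (some a) (some b) := by
  rw [PySem.List.slice_toNat (ha := h0) (hb := hb), PySem.List.slice_toNat (ha := h0) (hb := hb),
      List.drop_append_of_le_length (by omega),
      List.take_append_of_le_length (by simp; omega)]

lemma pv_stepA_append (cs : List Char) (c : Char) (st : pvSt) (i : Int)
    (h0 : 0 ≤ i) (h3 : i + 4 ≤ (cs.length : Int)) :
    pvStepA (cs ++ [c]) st i = pvStepA cs st i := by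
  unfold pvStepA
  rw [pv_slice_append _ _ _ _ h0 (by omega) (by omega) (by omega),
      pv_slice_append _ _ _ _ (by omega) (by omega) (by omega) (by omega)]

-- core invariant: on one string, B's character fold is A's index fold, and the
-- carried window is the last ≤ 4 characters seen
lemma pv_inner (cs : List Char) (st : pvSt) :
    cs.foldl pvStepB (st, ([] : List Char))
      = ((PySem.List.pyRange 0 ((cs.length : Int) - 3) 1).foldl (pvStepA cs) st,
         cs.drop (cs.length - 4)) := by
  induction cs using List.reverseRecOn generalizing st with
  | nil =>
      rw [PySem.List.pyRange_one_eq_nil (by norm_num)]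
      simp
  | append_singleton cs c ih =>
      rw [List.foldl_append, ih, List.foldl_cons, List.foldl_nil]
      unfold pvStepB
      dsimp only
      rw [pv_window_step]
      rcases Nat.lt_or_ge cs.length 3 with hn | hn
      case inl =>
        have e0 : cs.length + 1 - 4 = 0 := by omega
        have hne : ¬ (((cs ++ [c]).drop (cs.length + 1 - 4)).length == 4) = true := by
          simp; omega
        rw [if_neg hne, PySem.List.pyRange_one_eq_nil (by omega),
            PySem.List.pyRange_one_eq_nil (by simp; omega)]
        simp [e0]
      case inr =>
        have hlen : (((cs ++ [c]).drop (cs.length + 1 - 4)).length == 4) = true := by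
          simp; omega
        rw [if_pos hlen]
        have hr : PySem.List.pyRange 0 ((((cs ++ [c]).length : Int)) - 3) 1
            = PySem.List.pyRange 0 ((cs.length : Int) - 3) 1 ++ [(cs.length : Int) - 3] := by
          have e : (((cs ++ [c]).length : Int)) - 3 = ((cs.length : Int) - 3) + 1 := by
            simp; ring
          rw [e, PySem.List.pyRange_one_succ_right (by omega)]
        rw [hr, List.foldl_append, List.foldl_cons, List.foldl_nil,
            PySem.List.foldl_congr_mem _ _ (pvStepA cs) st
              (fun st i hi => pv_stepA_append cs c st i
                (by have := (PySem.List.mem_pyRange_one.mp hi).1; omega)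
                (by have := (PySem.List.mem_pyRange_one.mp hi).2; omega))]
        unfold pvStepA
        dsimp only
        have e1 : PySem.List.slice (cs ++ [c]) (some ((cs.length : Int) - 3))
              (some ((cs.length : Int) - 3 + 3))
            = PySem.List.slice ((cs ++ [c]).drop (cs.length + 1 - 4)) none (some 3) := by
          rw [PySem.List.slice_toNat (ha := by omega) (hb := by omega),
              PySem.List.slice_to _ (by norm_num)]
          congr 1
          · omega
          · congr 1
            omega
        have e2 : PySem.List.slice (cs ++ [c]) (some ((cs.length : Int) - 3 + 1))
              (some ((cs.length : Int) - 3 + 4))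
            = PySem.List.slice ((cs ++ [c]).drop (cs.length + 1 - 4)) (some 1) none := by
          rw [PySem.List.slice_toNat (ha := by omega) (hb := by omega),
              PySem.List.slice_from _ (by norm_num), List.drop_drop,
              List.take_of_length_le (by simp; omega)]
          congr 1
          omega
        rw [e1, e2, pv_dict_update]
        have e3 : (cs ++ [c]).length - 4 = cs.length + 1 - 4 := by simp
        rw [e3]

-- ===== VERDICT (by name: the statement is the Claim_ definition above) =====
theorem make_pairs_list_spec : Claim_equal_make_pairs_list := by
  intro l _
  unfold Spec_make_pairs_list make_pairs_list make_pairs_list_alt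
  dsimp only
  have h : ∀ (st : pvSt) (s : String), s ∈ l →
      (s.toList.foldl pvStepB (st, ([] : List Char))).1
        = (PySem.List.pyRange 0 (PySem.Str.len s - 3) 1).foldl (pvStepA s.toList) st := by
    intro st s _
    rw [pv_inner]
    simp [PySem.Str.len_eq]
  rw [PySem.List.foldl_congr_mem _ _ _ (PySem.Dict.empty, PySem.Set.empty)
    (fun st s hs => (h st s hs).symm)]
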